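-- pv_equiv track=rewrite | github.com/ThiagoDe/codesignal_core_python | addition_carring.py | solution
-- ===== SOURCE A (Python) =====
-- def solution(param1, param2):
--     res = ''
--     list1 = list(map(int, list(str(param1))))
--     list2 = list(map(int, list(str(param2))))
--     while list1 and list2:
--         n1 = list1.pop()
--         n2 = list2.pop()
--         res = str((n1 + n2) % 10) + res
--
--     if list1:
--         res = ''.join(map(str, list1)) + res
--     if list2:
--         res = ''.join(map(str, (list2))) + res
--
--     return int(res)
-- ===== SOURCE B (Python) =====
-- def solution(param1, param2):
--     s1, s2 = str(param1), str(param2)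
--     n = max(len(s1), len(s2))
--     z1, z2 = s1.zfill(n), s2.zfill(n)
--     res = ''.join(str((int(a) + int(b)) % 10) for a, b in zip(z1, z2))
--     return int(res)
-- ===== Notes on version B (the rewrite author's own statement) =====
-- stated objective: idiomatic
-- what changed: Replaces the two destructive pop loops and the two remainder-splicing if-branches with zero-padding both strings to a common width (zfill) and one left-to-right zip pass joined into the result string.
import Mathlib
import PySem

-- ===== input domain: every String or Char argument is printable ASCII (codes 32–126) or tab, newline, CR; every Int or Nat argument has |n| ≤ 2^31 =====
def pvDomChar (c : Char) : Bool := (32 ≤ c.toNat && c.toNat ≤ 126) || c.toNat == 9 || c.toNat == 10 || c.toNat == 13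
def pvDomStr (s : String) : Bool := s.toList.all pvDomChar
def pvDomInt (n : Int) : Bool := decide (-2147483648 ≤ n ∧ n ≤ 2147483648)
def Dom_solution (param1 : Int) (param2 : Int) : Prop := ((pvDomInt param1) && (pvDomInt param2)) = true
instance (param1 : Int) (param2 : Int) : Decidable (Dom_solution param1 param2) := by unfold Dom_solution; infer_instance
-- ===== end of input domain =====

-- B replaces A's two destructive pop loops and remainder-splicing branches by zero-padding
-- both digit strings to a common width and doing one left-to-right zip pass (idiomatic; not faster).


-- ===== PORT A =====
-- int(c) for a one-character string (used by both ports for the per-character int() calls;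
-- inside Pre_ every such character is a digit, so the `.getD 0` default is never reached)
def pyIntChar (c : Char) : Int := (PySem.Int.ofChars? [c]).getD 0

-- the `while list1 and list2:` loop: pop the last element of each, prepend str((n1+n2)%10)
def aLoop (l1 l2 : List Int) (res : List Char) : List Int × List Int × List Char :=
  if l1 ≠ [] ∧ l2 ≠ [] then
    match hp : PySem.List.pop? l1 (-1) with
    | some (n1, l1') =>
      match PySem.List.pop? l2 (-1) with
      | some (n2, l2') =>
        aLoop l1' l2' (PySem.Int.toChars (PySem.Int.mod (n1 + n2) 10) ++ res)
      | none => (l1, l2, res)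
    | none => (l1, l2, res)
  else (l1, l2, res)
termination_by l1.length
decreasing_by
  have := PySem.List.length_of_pop?_eq_some (xs := l1) (i := -1) hp
  simp at this; omega

def solution (param1 : Int) (param2 : Int) : Int :=
  let list1 := (PySem.Int.toChars param1).map pyIntChar
  let list2 := (PySem.Int.toChars param2).map pyIntChar
  let t := aLoop list1 list2 []
  let res1 := if t.1 ≠ [] then PySem.Chars.join [] (t.1.map PySem.Int.toChars) ++ t.2.2 else t.2.2
  let res2 := if t.2.1 ≠ [] then PySem.Chars.join [] (t.2.1.map PySem.Int.toChars) ++ res1 else res1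
  (PySem.Int.ofChars? res2).getD 0

-- ===== PORT B =====
def solution_alt (param1 : Int) (param2 : Int) : Int :=
  let s1 := PySem.Int.toChars param1
  let s2 := PySem.Int.toChars param2
  let n : Int := max (s1.length : Int) (s2.length : Int)
  let z1 := PySem.Chars.zfill s1 n
  let z2 := PySem.Chars.zfill s2 n
  let res := PySem.Chars.join []
    ((z1.zip z2).map (fun p => PySem.Int.toChars (PySem.Int.mod (pyIntChar p.1 + pyIntChar p.2) 10)))
  (PySem.Int.ofChars? res).getD 0

-- ===== PRECONDITION & SPEC =====
-- Pre_ excludes exactly the inputs on which A raises: a negative parameter makes int('-') raise ValueError.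
def Pre_solution (param1 : Int) (param2 : Int) : Prop := 0 ≤ param1 ∧ 0 ≤ param2
instance (param1 : Int) (param2 : Int) : Decidable (Pre_solution param1 param2) := by unfold Pre_solution; infer_instance
def pvWitness_solution : Int × Int := (3, 58)

def Spec_solution (param1 : Int) (param2 : Int) (out : Int) : Prop := out = solution_alt param1 param2
instance (param1 : Int) (param2 : Int) (out : Int) : Decidable (Spec_solution param1 param2 out) := by unfold Spec_solution; infer_instance

-- ===== CLAIM (what is proved, stated in full; the proofs are below) =====
def Claim_equal_solution : Prop := ∀ (param1 : Int) (param2 : Int), Dom_solution param1 param2 → Pre_solution param1 param2 → Spec_solution param1 param2 (solution param1 param2)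

-- ===== LEMMAS AND PROOFS =====

-- the decimal digit characters of n (most significant first), and its digit values
def myDigs (n : Nat) : List Char :=
  if n < 10 then [Nat.digitChar n] else myDigs (n / 10) ++ [Nat.digitChar (n % 10)]
decreasing_by exact Nat.div_lt_self (by omega) (by omega)

def dListN (n : Nat) : List Nat :=
  if n < 10 then [n] else dListN (n / 10) ++ [n % 10]
decreasing_by exact Nat.div_lt_self (by omega) (by omega)

-- the common result string: digit-wise mod-10 sum, leading digits of the longer number kept
def Fd (A B : Nat) : List Char :=
  if A < 10 then
    if B < 10 then [Nat.digitChar ((A + B) % 10)]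
    else myDigs (B / 10) ++ [Nat.digitChar ((A + B % 10) % 10)]
  else if B < 10 then myDigs (A / 10) ++ [Nat.digitChar ((A % 10 + B) % 10)]
  else Fd (A / 10) (B / 10) ++ [Nat.digitChar ((A % 10 + B % 10) % 10)]
decreasing_by exact Nat.div_lt_self (by omega) (by omega)

lemma myDigs_eq_map (n : Nat) : myDigs n = (dListN n).map Nat.digitChar := by
  induction n using Nat.strong_induction_on with
  | _ n ih =>
    rw [myDigs, dListN]
    by_cases h : n < 10
    · simp [h]
    · simp only [h, if_false, List.map_append, List.map_cons, List.map_nil]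
      rw [ih (n / 10) (Nat.div_lt_self (by omega) (by omega))]

lemma dListN_lt (n : Nat) : ∀ d ∈ dListN n, d < 10 := by
  induction n using Nat.strong_induction_on with
  | _ n ih =>
    rw [dListN]
    by_cases h : n < 10
    · simp [h]
    · simp only [h, if_false, List.mem_append, List.mem_singleton]
      rintro d (hd | rfl)
      · exact ih (n / 10) (Nat.div_lt_self (by omega) (by omega)) d hd
      · exact Nat.mod_lt _ (by omega)

lemma dListN_ne_nil (n : Nat) : dListN n ≠ [] := by
  rw [dListN]; split <;> simp

lemma toDigitsCore_eq (f : Nat) : ∀ n ds, n < f → Nat.toDigitsCore 10 f n ds = myDigs n ++ ds := by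
  induction f with
  | zero => omega
  | succ f ih =>
    intro n ds hf
    rw [Nat.toDigitsCore, myDigs]
    by_cases h : n < 10
    · have h0 : n / 10 = 0 := Nat.div_eq_of_lt h
      simp [h0, h, Nat.mod_eq_of_lt h]
    · have h0 : ¬ n / 10 = 0 := by
        intro h0
        exact h (by omega)
      rw [if_neg h0, if_neg h,
        ih (n / 10) _ (by have := Nat.div_lt_self (show 0 < n by omega) (show 1 < 10 by omega); omega)]
      simp

lemma toChars_nonneg (a : Int) (h : 0 ≤ a) : PySem.Int.toChars a = myDigs a.toNat := by
  rw [PySem.Int.toChars, if_neg (by omega), Nat.toDigits,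
    toDigitsCore_eq _ _ _ (Nat.lt_succ_self _), List.append_nil]

lemma pyIntChar_digit (d : Nat) (hd : d < 10) : pyIntChar (Nat.digitChar d) = (d : Int) := by
  interval_cases d <;> decide

lemma toChars_small (d : Nat) (hd : d < 10) : PySem.Int.toChars (d : Int) = [Nat.digitChar d] := by
  rw [toChars_nonneg _ (by omega), Int.toNat_natCast, myDigs, if_pos hd]

-- === A side ===

def aPost (t : List Int × List Int × List Char) : List Char :=
  let res1 := if t.1 ≠ [] then PySem.Chars.join [] (t.1.map PySem.Int.toChars) ++ t.2.2 else t.2.2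
  if t.2.1 ≠ [] then PySem.Chars.join [] (t.2.1.map PySem.Int.toChars) ++ res1 else res1

lemma join_singletons (L : List Nat) (hL : ∀ d ∈ L, d < 10) :
    PySem.Chars.join [] ((L.map (fun d : Nat => (d : Int))).map PySem.Int.toChars) = L.map Nat.digitChar := by
  have h : (L.map (fun d : Nat => (d : Int))).map PySem.Int.toChars
      = (L.map Nat.digitChar).map (fun c => [c]) := by
    rw [List.map_map, List.map_map]
    refine List.map_congr_left (fun d hd => ?_)
    simp only [Function.comp_apply]
    exact toChars_small d (hL d hd)
  rw [h, PySem.Chars.join_nil_singletons]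

lemma mod10_natCast (x y : Nat) :
    PySem.Int.mod ((x : Int) + (y : Int)) 10 = (((x + y) % 10 : Nat) : Int) := by
  have : ((x : Int) + (y : Int)) = ((x + y : Nat) : Int) := by push_cast; ring
  rw [this, show (10 : Int) = ((10 : Nat) : Int) from rfl, PySem.Int.mod_natCast]

lemma toChars_mod10 (x y : Nat) :
    PySem.Int.toChars (PySem.Int.mod ((x : Int) + (y : Int)) 10) = [Nat.digitChar ((x + y) % 10)] := by
  rw [mod10_natCast, toChars_small _ (Nat.mod_lt _ (by omega))]

lemma aLoop_nil_right (l : List Int) (res : List Char) : aLoop l [] res = (l, [], res) := by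
  rw [aLoop]; simp

lemma aLoop_step (l1 l2 l1' l2' : List Int) (n1 n2 : Int) (res : List Char)
    (h1 : PySem.List.pop? l1 (-1) = some (n1, l1'))
    (h2 : PySem.List.pop? l2 (-1) = some (n2, l2'))
    (hne : l1 ≠ [] ∧ l2 ≠ []) :
    aLoop l1 l2 res = aLoop l1' l2' (PySem.Int.toChars (PySem.Int.mod (n1 + n2) 10) ++ res) := by
  rw [aLoop, if_pos hne]
  split
  next a b hab =>
    split
    next c d hcd =>
      rw [h1] at hab; rw [h2] at hcd
      simp only [Option.some.injEq, Prod.mk.injEq] at hab hcd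
      obtain ⟨rfl, rfl⟩ := hab
      obtain ⟨rfl, rfl⟩ := hcd
      rfl
    next hcd =>
      rw [h2] at hcd; simp at hcd
  next hab =>
    rw [h1] at hab; simp at hab

lemma aSide (A : Nat) : ∀ (B : Nat) (res : List Char),
    aPost (aLoop ((dListN A).map (fun d : Nat => (d : Int))) ((dListN B).map (fun d : Nat => (d : Int))) res)
      = Fd A B ++ res := by
  induction A using Nat.strong_induction_on with
  | _ A ih =>
    intro B res
    by_cases hA : A < 10 <;> by_cases hB : B < 10
    · -- both one-digit
      rw [show dListN A = [A] from by rw [dListN]; exact if_pos hA,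
          show dListN B = [B] from by rw [dListN]; exact if_pos hB]
      have h1 := PySem.List.pop?_last ([] : List Int) (A : Int)
      have h2 := PySem.List.pop?_last ([] : List Int) (B : Int)
      simp only [List.nil_append] at h1 h2
      rw [show ([A].map (fun d : Nat => (d : Int))) = [(A : Int)] from rfl,
          show ([B].map (fun d : Nat => (d : Int))) = [(B : Int)] from rfl,
          aLoop_step _ _ _ _ _ _ _ h1 h2 (by constructor <;> simp),
          aLoop_nil_right, aPost, toChars_mod10, Fd, if_pos hA, if_pos hB]
      simp
    · -- A < 10 ≤ B
      rw [show dListN A = [A] from by rw [dListN]; exact if_pos hA,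
          show dListN B = dListN (B / 10) ++ [B % 10] from by rw [dListN]; exact if_neg hB]
      have h1 := PySem.List.pop?_last ([] : List Int) (A : Int)
      simp only [List.nil_append] at h1
      have h2 := PySem.List.pop?_last ((dListN (B / 10)).map (fun d : Nat => (d : Int))) ((B % 10 : Nat) : Int)
      rw [show ([A].map (fun d : Nat => (d : Int))) = [(A : Int)] from rfl, List.map_append,
          show (([B % 10].map (fun d : Nat => (d : Int)))) = [((B % 10 : Nat) : Int)] from rfl,
          aLoop_step _ _ _ _ _ _ _ h1 h2 (by constructor <;> simp)]
      rw [show aLoop ([] : List Int) ((dListN (B / 10)).map (fun d : Nat => (d : Int)))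
            (PySem.Int.toChars (PySem.Int.mod ((A : Int) + ((B % 10 : Nat) : Int)) 10) ++ res)
          = ([], (dListN (B / 10)).map (fun d : Nat => (d : Int)),
            PySem.Int.toChars (PySem.Int.mod ((A : Int) + ((B % 10 : Nat) : Int)) 10) ++ res) from by
        rw [aLoop]; simp]
      rw [aPost]
      simp only [ne_eq, not_true_eq_false, if_false, List.map_eq_nil_iff, dListN_ne_nil,
        not_false_eq_true, if_true]
      rw [join_singletons _ (dListN_lt _), ← myDigs_eq_map, toChars_mod10,
          Fd, if_pos hA, if_neg hB]
      simp
    · -- B < 10 ≤ A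
      rw [show dListN A = dListN (A / 10) ++ [A % 10] from by rw [dListN]; exact if_neg hA,
          show dListN B = [B] from by rw [dListN]; exact if_pos hB]
      have h1 := PySem.List.pop?_last ((dListN (A / 10)).map (fun d : Nat => (d : Int))) ((A % 10 : Nat) : Int)
      have h2 := PySem.List.pop?_last ([] : List Int) (B : Int)
      simp only [List.nil_append] at h2
      rw [show ([B].map (fun d : Nat => (d : Int))) = [(B : Int)] from rfl, List.map_append,
          show (([A % 10].map (fun d : Nat => (d : Int)))) = [((A % 10 : Nat) : Int)] from rfl,
          aLoop_step _ _ _ _ _ _ _ h1 h2 (by constructor <;> simp),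
          aLoop_nil_right, aPost]
      simp only [ne_eq, not_true_eq_false, if_false, List.map_eq_nil_iff, dListN_ne_nil,
        not_false_eq_true, if_true]
      rw [join_singletons _ (dListN_lt _), ← myDigs_eq_map, toChars_mod10,
          Fd, if_neg hA, if_pos hB]
      simp
    · -- both multi-digit: one loop step, then the IH
      rw [show dListN A = dListN (A / 10) ++ [A % 10] from by rw [dListN]; exact if_neg hA,
          show dListN B = dListN (B / 10) ++ [B % 10] from by rw [dListN]; exact if_neg hB]
      have h1 := PySem.List.pop?_last ((dListN (A / 10)).map (fun d : Nat => (d : Int))) ((A % 10 : Nat) : Int)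
      have h2 := PySem.List.pop?_last ((dListN (B / 10)).map (fun d : Nat => (d : Int))) ((B % 10 : Nat) : Int)
      rw [List.map_append, List.map_append,
          show (([A % 10].map (fun d : Nat => (d : Int)))) = [((A % 10 : Nat) : Int)] from rfl,
          show (([B % 10].map (fun d : Nat => (d : Int)))) = [((B % 10 : Nat) : Int)] from rfl,
          aLoop_step _ _ _ _ _ _ _ h1 h2 (by constructor <;> simp),
          toChars_mod10, ih (A / 10) (Nat.div_lt_self (by omega) (by omega)) (B / 10)]
      conv_rhs => rw [Fd, if_neg hA, if_neg hB]
      simp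

lemma solution_eq (p1 p2 : Int) (h1 : 0 ≤ p1) (h2 : 0 ≤ p2) :
    solution p1 p2 = (PySem.Int.ofChars? (Fd p1.toNat p2.toNat)).getD 0 := by
  have e1 : (PySem.Int.toChars p1).map pyIntChar = (dListN p1.toNat).map (fun d : Nat => (d : Int)) := by
    rw [toChars_nonneg _ h1, myDigs_eq_map, List.map_map]
    exact List.map_congr_left (fun d hd => pyIntChar_digit d (dListN_lt _ d hd))
  have e2 : (PySem.Int.toChars p2).map pyIntChar = (dListN p2.toNat).map (fun d : Nat => (d : Int)) := by
    rw [toChars_nonneg _ h2, myDigs_eq_map, List.map_map]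
    exact List.map_congr_left (fun d hd => pyIntChar_digit d (dListN_lt _ d hd))
  show (PySem.Int.ofChars? (aPost (aLoop ((PySem.Int.toChars p1).map pyIntChar)
      ((PySem.Int.toChars p2).map pyIntChar) []))).getD 0 = _
  rw [e1, e2, aSide, List.append_nil]

-- === B side ===

def gB (p : Char × Char) : List Char :=
  PySem.Int.toChars (PySem.Int.mod (pyIntChar p.1 + pyIntChar p.2) 10)

def padTo (X m : Nat) : List Char :=
  List.replicate (m - (myDigs X).length) '0' ++ myDigs X

lemma myDigs_small (A : Nat) (h : A < 10) : myDigs A = [Nat.digitChar A] := by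
  conv_lhs => rw [myDigs]
  exact if_pos h

lemma myDigs_big (A : Nat) (h : ¬ A < 10) : myDigs A = myDigs (A / 10) ++ [Nat.digitChar (A % 10)] := by
  conv_lhs => rw [myDigs]
  exact if_neg h

lemma len_myDigs_pos (n : Nat) : 0 < (myDigs n).length := by
  rw [myDigs_eq_map, List.length_map]
  exact List.length_pos_of_ne_nil (dListN_ne_nil n)

lemma len_myDigs_small (A : Nat) (h : A < 10) : (myDigs A).length = 1 := by
  rw [myDigs_small A h]; rfl

lemma len_myDigs_big (A : Nat) (h : ¬ A < 10) : (myDigs A).length = (myDigs (A / 10)).length + 1 := by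
  rw [myDigs_big A h]; simp

lemma join_nil_flatten (ls : List (List Char)) : PySem.Chars.join [] ls = ls.flatten := by
  induction ls with
  | nil => simp [PySem.Chars.join, List.intercalate]
  | cons a tl ih =>
    cases tl with
    | nil => simp [PySem.Chars.join, List.intercalate]
    | cons b t =>
      rw [PySem.Chars.join_cons_cons, ih, List.flatten_cons]
      simp

lemma g_digits (d e : Nat) (hd : d < 10) (he : e < 10) :
    gB (Nat.digitChar d, Nat.digitChar e) = [Nat.digitChar ((d + e) % 10)] := by
  rw [gB]
  show PySem.Int.toChars (PySem.Int.mod (pyIntChar (Nat.digitChar d) + pyIntChar (Nat.digitChar e)) 10) = _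
  rw [pyIntChar_digit d hd, pyIntChar_digit e he, toChars_mod10]

lemma zipZeroRight (L : List Nat) (hL : ∀ d ∈ L, d < 10) :
    ((List.zip (L.map Nat.digitChar) (List.replicate L.length '0')).map gB).flatten
      = L.map Nat.digitChar := by
  induction L with
  | nil => simp
  | cons d L ih =>
    have h10 := hL d (by simp)
    have hg : gB (Nat.digitChar d, '0') = [Nat.digitChar d] := by
      have := g_digits d 0 h10 (by omega)
      simpa [Nat.mod_eq_of_lt h10] using this
    simp only [List.map_cons, List.length_cons, List.replicate_succ, List.zip_cons_cons,
      List.flatten_cons, hg]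
    rw [ih (fun e he => hL e (by simp [he]))]
    simp

lemma zipZeroLeft (L : List Nat) (hL : ∀ d ∈ L, d < 10) :
    ((List.zip (List.replicate L.length '0') (L.map Nat.digitChar)).map gB).flatten
      = L.map Nat.digitChar := by
  induction L with
  | nil => simp
  | cons d L ih =>
    have h10 := hL d (by simp)
    have hg : gB ('0', Nat.digitChar d) = [Nat.digitChar d] := by
      have := g_digits 0 d (by omega) h10
      simpa [Nat.mod_eq_of_lt h10] using this
    simp only [List.map_cons, List.length_cons, List.replicate_succ, List.zip_cons_cons,
      List.flatten_cons, hg]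
    rw [ih (fun e he => hL e (by simp [he]))]
    simp

lemma zfill_digits (X : Nat) (w : Int) : PySem.Chars.zfill (myDigs X) w = padTo X w.toNat := by
  rw [PySem.Chars.zfill.eq_def, padTo]
  by_cases h : w ≤ ((myDigs X).length : Int)
  · rw [if_pos h, show w.toNat - (myDigs X).length = 0 from by omega, List.replicate_zero,
      List.nil_append]
  · rw [if_neg h]
    obtain ⟨d, L, hdl, hd10⟩ : ∃ d L, dListN X = d :: L ∧ d < 10 := by
      cases hq : dListN X with
      | nil => exact absurd hq (dListN_ne_nil X)
      | cons d L => exact ⟨d, L, rfl, dListN_lt X d (by rw [hq]; simp)⟩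
    have hcons : myDigs X = Nat.digitChar d :: L.map Nat.digitChar := by
      rw [myDigs_eq_map, hdl, List.map_cons]
    have hsign : ¬ (Nat.digitChar d = '+' ∨ Nat.digitChar d = '-') := by
      interval_cases d <;> decide
    rw [hcons]
    simp only [if_neg hsign]

lemma bSide (A : Nat) : ∀ (B m : Nat), m = max (myDigs A).length (myDigs B).length →
    ((List.zip (padTo A m) (padTo B m)).map gB).flatten = Fd A B := by
  induction A using Nat.strong_induction_on with
  | _ A ih =>
    intro B m hm
    by_cases hA : A < 10 <;> by_cases hB : B < 10
    · -- both one-digit, m = 1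
      have hm1 : m = 1 := by
        rw [len_myDigs_small A hA, len_myDigs_small B hB] at hm; omega
      subst hm1
      rw [padTo, padTo, len_myDigs_small A hA, len_myDigs_small B hB, Nat.sub_self,
        List.replicate_zero, List.nil_append, List.nil_append, myDigs_small A hA,
        myDigs_small B hB]
      simp only [List.zip_cons_cons, List.zip_nil_right, List.map_cons, List.map_nil,
        List.flatten_cons, List.flatten_nil, List.append_nil]
      rw [g_digits A B hA hB, Fd, if_pos hA, if_pos hB]
    · -- A one-digit, B multi-digit
      have hlA : (myDigs A).length = 1 := len_myDigs_small A hA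
      have hlB : (myDigs B).length = (myDigs (B / 10)).length + 1 := len_myDigs_big B hB
      have posB := len_myDigs_pos (B / 10)
      have hm' : m = (myDigs B).length := by omega
      have pB : padTo B m = myDigs (B / 10) ++ [Nat.digitChar (B % 10)] := by
        rw [padTo, hm', Nat.sub_self, List.replicate_zero, List.nil_append, myDigs_big B hB]
      have pA : padTo A m = List.replicate (m - 1) '0' ++ [Nat.digitChar A] := by
        rw [padTo, hlA, myDigs_small A hA]
      have hdl : (dListN (B / 10)).length = (myDigs (B / 10)).length := by
        rw [myDigs_eq_map, List.length_map]
      rw [pA, pB, List.zip_append (by simp; omega), List.map_append, List.flatten_append,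
        myDigs_eq_map, show m - 1 = (dListN (B / 10)).length from by omega,
        zipZeroLeft _ (dListN_lt _)]
      simp only [List.zip_cons_cons, List.zip_nil_right, List.map_cons, List.map_nil,
        List.flatten_cons, List.flatten_nil, List.append_nil]
      rw [g_digits A (B % 10) hA (Nat.mod_lt _ (by omega))]
      conv_rhs => rw [Fd, if_pos hA, if_neg hB]
      simp [myDigs_eq_map]
    · -- B one-digit, A multi-digit
      have hlB : (myDigs B).length = 1 := len_myDigs_small B hB
      have hlA : (myDigs A).length = (myDigs (A / 10)).length + 1 := len_myDigs_big A hA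
      have posA := len_myDigs_pos (A / 10)
      have hm' : m = (myDigs A).length := by omega
      have pA : padTo A m = myDigs (A / 10) ++ [Nat.digitChar (A % 10)] := by
        rw [padTo, hm', Nat.sub_self, List.replicate_zero, List.nil_append, myDigs_big A hA]
      have pB : padTo B m = List.replicate (m - 1) '0' ++ [Nat.digitChar B] := by
        rw [padTo, hlB, myDigs_small B hB]
      have hdl : (dListN (A / 10)).length = (myDigs (A / 10)).length := by
        rw [myDigs_eq_map, List.length_map]
      rw [pA, pB, List.zip_append (by simp; omega), List.map_append, List.flatten_append,
        myDigs_eq_map, show m - 1 = (dListN (A / 10)).length from by omega,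
        zipZeroRight _ (dListN_lt _)]
      simp only [List.zip_cons_cons, List.zip_nil_right, List.map_cons, List.map_nil,
        List.flatten_cons, List.flatten_nil, List.append_nil]
      rw [g_digits (A % 10) B (Nat.mod_lt _ (by omega)) hB]
      conv_rhs => rw [Fd, if_neg hA, if_pos hB]
      simp [myDigs_eq_map]
    · -- both multi-digit
      have hlA : (myDigs A).length = (myDigs (A / 10)).length + 1 := len_myDigs_big A hA
      have hlB : (myDigs B).length = (myDigs (B / 10)).length + 1 := len_myDigs_big B hB
      have posA := len_myDigs_pos (A / 10)
      have posB := len_myDigs_pos (B / 10)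
      have hm' : m - 1 = max (myDigs (A / 10)).length (myDigs (B / 10)).length := by omega
      have pA : padTo A m = padTo (A / 10) (m - 1) ++ [Nat.digitChar (A % 10)] := by
        rw [padTo, padTo, myDigs_big A hA,
          show m - (myDigs (A / 10) ++ [Nat.digitChar (A % 10)]).length
            = m - 1 - (myDigs (A / 10)).length from by simp; omega]
        rw [List.append_assoc]
      have pB : padTo B m = padTo (B / 10) (m - 1) ++ [Nat.digitChar (B % 10)] := by
        rw [padTo, padTo, myDigs_big B hB,
          show m - (myDigs (B / 10) ++ [Nat.digitChar (B % 10)]).length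
            = m - 1 - (myDigs (B / 10)).length from by simp; omega]
        rw [List.append_assoc]
      have hlen : (padTo (A / 10) (m - 1)).length = (padTo (B / 10) (m - 1)).length := by
        simp only [padTo, List.length_append, List.length_replicate]
        omega
      rw [pA, pB, List.zip_append hlen, List.map_append, List.flatten_append,
        ih (A / 10) (Nat.div_lt_self (by omega) (by omega)) (B / 10) (m - 1) hm']
      simp only [List.zip_cons_cons, List.zip_nil_right, List.map_cons, List.map_nil,
        List.flatten_cons, List.flatten_nil, List.append_nil]
      rw [g_digits (A % 10) (B % 10) (Nat.mod_lt _ (by omega)) (Nat.mod_lt _ (by omega))]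
      conv_rhs => rw [Fd, if_neg hA, if_neg hB]

lemma solution_alt_eq (p1 p2 : Int) (h1 : 0 ≤ p1) (h2 : 0 ≤ p2) :
    solution_alt p1 p2 = (PySem.Int.ofChars? (Fd p1.toNat p2.toNat)).getD 0 := by
  have e1 : PySem.Int.toChars p1 = myDigs p1.toNat := toChars_nonneg _ h1
  have e2 : PySem.Int.toChars p2 = myDigs p2.toNat := toChars_nonneg _ h2
  have hgb : (fun p : Char × Char =>
      PySem.Int.toChars (PySem.Int.mod (pyIntChar p.1 + pyIntChar p.2) 10)) = gB := rfl
  simp only [solution_alt, e1, e2, hgb]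
  rw [zfill_digits, zfill_digits, join_nil_flatten, ← Nat.cast_max, Int.toNat_natCast,
    bSide p1.toNat p2.toNat _ rfl]

theorem solution_spec : Claim_equal_solution := by
  intro p1 p2 _ hpre
  unfold Pre_solution at hpre
  unfold Spec_solution
  rw [solution_eq p1 p2 hpre.1 hpre.2, solution_alt_eq p1 p2 hpre.1 hpre.2]
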